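-- pv_equiv track=rewrite | github.com/aiskd/Phazed-Game-Bot | phazed.py | possible_sameitems
-- ===== SOURCE A (Python) =====
-- def possible_sameitems(length, index, aces, remainder):
--     '''
--
--     This function will find all the lists with the same items.
--     It will take in the length that is wanted for the list, the index they wish
--     to match (0 for value, 1 for suit), 2 lists of 2-strings.
--     It will output all the possible lists with the same items.
--
--     '''
--
--     # This variable holds the frequencies of the items.
--     tally = {}
--     # This variable holds all the possible lists with the same item.
--     phase_sameitems = []
--     # This variable holds one of the lists with the same item, which will
--     # be appended into phase_sameitems.
--     set_sameitems = []
--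
--     # First, we find the frequencies of the items.
--     for card in remainder:
--             if card[index] in tally:
--                 tally[card[index]] += 1
--             else:
--                 tally[card[index]] = 1
--
--     # Then we check if the frequency is more than the length.
--     for key in tally:
--         if tally[key] >= length:
--             # If so, it will make 1 list.
--             for card in remainder:
--                 if card[index] == key:
--                     set_sameitems.append(card)
--
--             # This will remove the elements in the list until it matches
--             # the length needed.
--             while len(set_sameitems) > length:
--                 set_sameitems.pop(-1)
--             phase_sameitems.append(set_sameitems)
--
--             # This will remove the cards to prevent duplicates.
--             for card in set_sameitems:
--                 remainder.remove(card)
--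
--             set_sameitems = []
--
--         # The frequency has to be bigger than 2 because you can only play a
--         # group if it at least has 2 natural numbers.
--         elif tally[key] >= 2 and tally[key] < length:
--
--             # If the frequency does not go over the wanted length, we can fill
--             # the rest of the cards with aces (If there are any).
--             if len(aces) >= (length - tally[key]):
--                 for card in remainder:
--                         if card[index] == key:
--                             set_sameitems.append(card)
--                 for card in aces:
--                     set_sameitems.append(card)
--                 while len(set_sameitems) > length:
--                     set_sameitems.pop(-1)
--                 phase_sameitems.append(set_sameitems)
--
--                 for card in set_sameitems:
--                     if card[0] != 'A':
--                         remainder.remove(card)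
--                     else:
--                         aces.remove(card)
--                 set_sameitems = []
--
--     if len(phase_sameitems) >= 2:
--         return phase_sameitems[-2:]
--     else:
--         return phase_sameitems
-- ===== SOURCE B (Python) =====
-- def possible_sameitems(length, index, aces, remainder):
--     # One-pass grouping instead of tally + repeated rescans/removals.
--     # Pure: does not mutate `aces`/`remainder` (A does; return value only is matched).
--     groups = {}
--     for card in remainder:
--         groups.setdefault(card[index], []).append(card)
--     result = []
--     free_aces = list(aces)
--     for cards in groups.values():
--         if len(cards) >= length:
--             result.append(cards[:length])
--         elif len(cards) >= 2:
--             need = length - len(cards)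
--             if len(free_aces) >= need:
--                 result.append(cards + free_aces[:need])
--                 free_aces = free_aces[need:]
--     return result[-2:] if len(result) >= 2 else result
-- ===== Notes on version B (the rewrite author's own statement) =====
-- stated objective: simpler
-- what changed: Replaces A's frequency dict plus per-key rescans and in-place removals on a mutated remainder/aces by a single grouping pass (key -> matching cards) and one pure fold over the groups with a shrinking free-ace list; B does not mutate its arguments (A does).
-- outside the precondition, e.g. on possible_sameitems(3, 0, ['XX', 'YY'], ['1H', '1S']): A raises ValueError, B returns [['1H', '1S', 'XX']]
import Mathlib
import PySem

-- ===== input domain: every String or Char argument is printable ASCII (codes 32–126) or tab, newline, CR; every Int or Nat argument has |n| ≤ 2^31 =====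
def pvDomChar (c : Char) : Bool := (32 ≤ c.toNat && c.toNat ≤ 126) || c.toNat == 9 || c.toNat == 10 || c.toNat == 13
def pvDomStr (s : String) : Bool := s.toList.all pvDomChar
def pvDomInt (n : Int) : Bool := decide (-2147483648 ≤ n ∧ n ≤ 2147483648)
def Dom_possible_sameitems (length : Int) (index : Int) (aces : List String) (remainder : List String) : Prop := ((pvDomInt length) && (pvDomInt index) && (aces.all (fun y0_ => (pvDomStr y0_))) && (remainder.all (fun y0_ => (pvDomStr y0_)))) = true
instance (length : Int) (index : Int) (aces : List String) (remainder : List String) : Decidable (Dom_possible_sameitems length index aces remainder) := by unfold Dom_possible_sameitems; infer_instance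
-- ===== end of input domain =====

-- B replaces A's tally dict + per-key rescans/removals on a mutated `remainder` by one grouping pass
-- and a pure fold over the groups (objective: simpler).  A mutates `aces`/`remainder` in place and B
-- does not; the equivalence proved here is about the return value only.

-- ===== PORT A =====
-- card[index] (both ports read a card's key this way; Pre_ keeps the index in range)
def pvKey (index : Int) (card : String) : Char := (PySem.Str.pyGet? card index).getD ' '

-- lst.remove(c): remove the first occurrence (Python raises if absent; never absent where A calls it under Pre_)
def pvRemoveD (r : List String) (c : String) : List String := (PySem.List.remove? r c).getD r

-- `while len(l) > length: l.pop(-1)` (the pop on an empty list that Python's `length < 0` would hit is excluded by Pre_)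
def pvTrim (length : Int) : List String → List String
  | [] => []
  | x :: xs => if ((x :: xs).length : Int) ≤ length then x :: xs else pvTrim length (x :: xs).dropLast
termination_by l => l.length
decreasing_by simp

-- the body of A's `for key in tally` loop; state = (aces, remainder, phase_sameitems)
def pvStepA (length index : Int) (t : PySem.Dict Char Int)
    (st : List String × List String × List (List String)) (key : Char) :
    List String × List String × List (List String) :=
  let aces := st.1; let rem := st.2.1; let phase := st.2.2
  if t.getD key 0 ≥ length then
    let s := rem.foldl (fun acc card => if pvKey index card == key then acc ++ [card] else acc) []
    let s := pvTrim length s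
    (aces, s.foldl (fun r c => pvRemoveD r c) rem, phase ++ [s])
  else if t.getD key 0 ≥ 2 ∧ t.getD key 0 < length then
    if (aces.length : Int) ≥ length - t.getD key 0 then
      let s := rem.foldl (fun acc card => if pvKey index card == key then acc ++ [card] else acc) []
      let s := aces.foldl (fun acc card => acc ++ [card]) s
      let s := pvTrim length s
      let ra := s.foldl (fun (p : List String × List String) c =>
          if (PySem.Str.pyGet? c 0).getD ' ' ≠ 'A' then (pvRemoveD p.1 c, p.2)
          else (p.1, pvRemoveD p.2 c)) (rem, aces)
      (ra.2, ra.1, phase ++ [s])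
    else (aces, rem, phase)
  else (aces, rem, phase)

def possible_sameitems (length : Int) (index : Int) (aces : List String) (remainder : List String) : List (List String) :=
  let tally := remainder.foldl (fun t card =>
      if t.contains (pvKey index card) then t.insert (pvKey index card) (t.getD (pvKey index card) 0 + 1)
      else t.insert (pvKey index card) 1) PySem.Dict.empty
  let r := tally.keys.foldl (pvStepA length index tally) (aces, remainder, [])
  if 2 ≤ r.2.2.length then PySem.List.slice r.2.2 (some (-2)) none else r.2.2

-- ===== PORT B =====
-- the body of B's `for cards in groups.values()` loop; state = (result, free_aces)
def pvStepB (length : Int) (st : List (List String) × List String) (cards : List String) :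
    List (List String) × List String :=
  if (cards.length : Int) ≥ length then
    (st.1 ++ [PySem.List.slice cards none (some length)], st.2)
  else if 2 ≤ cards.length then
    let need := length - (cards.length : Int)
    if (st.2.length : Int) ≥ need then
      (st.1 ++ [cards ++ PySem.List.slice st.2 none (some need)], PySem.List.slice st.2 (some need) none)
    else st
  else st

def possible_sameitems_alt (length : Int) (index : Int) (aces : List String) (remainder : List String) : List (List String) :=
  let groups := remainder.foldl (fun g card => g.modify (pvKey index card) [] (fun v => v ++ [card])) PySem.Dict.empty
  let r := groups.values.foldl (pvStepB length) ([], aces)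
  if 2 ≤ r.1.length then PySem.List.slice r.1 (some (-2)) none else r.1

-- ===== PRECONDITION & SPEC =====
-- Pre_ excludes inputs on which A raises (negative `length` with a non-empty remainder, an `index` out
-- of range for some card) and, when some key group of size in [2, length) could be padded from `aces`,
-- the malformed-card inputs (a non-ace in `aces` or an ace in `remainder`) on which A's
-- remove-from-the-wrong-list either raises ValueError or accidentally corrupts the other list
-- (examples in the claim cites); when no such padding group exists the card strings are unconstrained.
def Pre_possible_sameitems (length : Int) (index : Int) (aces : List String) (remainder : List String) : Prop :=
  (0 ≤ length ∨ remainder = []) ∧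
  (∀ c ∈ remainder, PySem.Raise.InRange c.toList.length index) ∧
  (((∀ a ∈ aces, PySem.Str.pyGet? a 0 = some 'A') ∧ (∀ c ∈ remainder, PySem.Str.pyGet? c 0 ≠ some 'A'))
   ∨ (∀ c ∈ remainder,
       ¬(2 ≤ (remainder.filter (fun d => PySem.Str.pyGet? d index == PySem.Str.pyGet? c index)).length
         ∧ ((remainder.filter (fun d => PySem.Str.pyGet? d index == PySem.Str.pyGet? c index)).length : Int) < length
         ∧ length ≤ ((remainder.filter (fun d => PySem.Str.pyGet? d index == PySem.Str.pyGet? c index)).length : Int) + (aces.length : Int))))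
instance (length : Int) (index : Int) (aces : List String) (remainder : List String) : Decidable (Pre_possible_sameitems length index aces remainder) := by unfold Pre_possible_sameitems; infer_instance

def pvWitness_possible_sameitems : Int × Int × List String × List String := (3, 0, ["AH", "AS"], ["2H", "2S", "5D"])

def Spec_possible_sameitems (length : Int) (index : Int) (aces : List String) (remainder : List String) (out : List (List String)) : Prop := out = possible_sameitems_alt length index aces remainder
instance (length : Int) (index : Int) (aces : List String) (remainder : List String) (out : List (List String)) : Decidable (Spec_possible_sameitems length index aces remainder out) := by unfold Spec_possible_sameitems; infer_instance

-- ===== CLAIM (what is proved, stated in full; the proofs are below) =====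
def Claim_equal_possible_sameitems : Prop := ∀ (length : Int) (index : Int) (aces : List String) (remainder : List String), Dom_possible_sameitems length index aces remainder → Pre_possible_sameitems length index aces remainder → Spec_possible_sameitems length index aces remainder (possible_sameitems length index aces remainder)

-- ===== LEMMAS AND PROOFS =====

-- structural recurrence for pvRemoveD
theorem pvRemoveD_cons (h : String) (t : List String) (c : String) :
    pvRemoveD (h :: t) c = if h == c then t else h :: pvRemoveD t c := by
  by_cases hc : h = c
  · simp [pvRemoveD, PySem.List.remove?, List.idxOf?_cons, hc]
  · simp only [pvRemoveD, PySem.List.remove?, List.idxOf?_cons, beq_iff_eq, hc, if_false]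
    cases hx : List.idxOf? c t <;> simp

-- removing an element the predicate rejects does not change the filter
theorem filter_pvRemoveD (p : String → Bool) (r : List String) (c : String) (hc : p c = false) :
    (pvRemoveD r c).filter p = r.filter p := by
  induction r with
  | nil => simp [pvRemoveD, PySem.List.remove?]
  | cons h t ih =>
    rw [pvRemoveD_cons]
    by_cases hh : h = c
    · subst hh; simp [hc]
    · simp only [beq_iff_eq, hh, if_false, List.filter_cons]
      cases hp : p h <;> simp [ih]

theorem filter_foldl_pvRemoveD (p : String → Bool) (s : List String) :
    ∀ r, (∀ c ∈ s, p c = false) → (s.foldl (fun r c => pvRemoveD r c) r).filter p = r.filter p := by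
  induction s with
  | nil => intro r _; rfl
  | cons h t ih =>
    intro r hc
    simp only [List.foldl_cons]
    rw [ih _ (fun c hm => hc c (List.mem_cons_of_mem _ hm)),
        filter_pvRemoveD _ _ _ (hc h (List.mem_cons_self))]

-- removing a prefix, element by element by value, is dropping it
theorem foldl_pvRemoveD_take (n : Nat) (l : List String) :
    (l.take n).foldl (fun a c => pvRemoveD a c) l = l.drop n := by
  induction n generalizing l with
  | zero => simp
  | succ n ih =>
    cases l with
    | nil => simp [List.take, List.drop]
    | cons h t =>
      simp only [List.take_succ_cons, List.foldl_cons, List.drop_succ_cons]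
      rw [pvRemoveD_cons]; simp [ih]

-- the trim loop is take (for non-negative target length)
theorem pvTrim_eq_take (length : Int) (h : 0 ≤ length) (l : List String) :
    pvTrim length l = l.take length.toNat := by
  induction l using pvTrim.induct length with
  | case1 => simp [pvTrim]
  | case2 x xs hle =>
    rw [pvTrim, if_pos hle]
    rw [List.take_of_length_le (by omega)]
  | case3 x xs hgt ih =>
    rw [pvTrim, if_neg hgt]
    rw [ih, List.dropLast_eq_take, List.take_take]
    congr 1
    simp only [List.length_cons] at hgt ⊢
    omega

-- A's tally loop builds Counter(card[index] for card in remainder)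
theorem pvTally_eq (index : Int) (remainder : List String) :
    remainder.foldl (fun t card =>
      if t.contains (pvKey index card) then t.insert (pvKey index card) (t.getD (pvKey index card) 0 + 1)
      else t.insert (pvKey index card) 1) PySem.Dict.empty
    = PySem.Dict.counter (remainder.map (pvKey index)) := by
  rw [PySem.List.foldl_congr_mem _ _
      (fun (t : PySem.Dict Char Int) card => t.insert (pvKey index card) (t.getD (pvKey index card) 0 + 1)) _ ?_]
  · rw [← PySem.Dict.foldl_insert_getD_add_one_eq_counter, List.foldl_map]
  · intro acc x _
    by_cases hc : acc.contains (pvKey index x)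
    · simp [hc]
    · rw [if_neg (by simp [hc])]
      show _ = acc.insert (pvKey index x) (acc.getD (pvKey index x) 0 + 1)
      rw [PySem.Dict.getD_of_not_contains _ _ (by simpa using hc)]
      norm_num

theorem pvCount_eq (index : Int) (remainder : List String) (k : Char) :
    (PySem.Dict.counter (remainder.map (pvKey index))).getD k 0
      = ((remainder.filter (fun c => pvKey index c == k)).length : Int) := by
  rw [PySem.Dict.getD_counter]
  norm_cast
  rw [List.count_eq_countP, List.countP_map, ← List.countP_eq_length_filter]
  rfl

-- B's grouping loop: each key holds, in order, the cards of `remainder` matching it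
theorem pvGroups_getD (index : Int) (remainder : List String) (k : Char) :
    (remainder.foldl (fun g card => g.modify (pvKey index card) [] (fun v => v ++ [card])) PySem.Dict.empty).getD k []
      = remainder.filter (fun c => pvKey index c == k) := by
  have h := PySem.Dict.getD_foldl_modify_append (remainder.map (fun c => (pvKey index c, c))) PySem.Dict.empty k
  rw [List.foldl_map] at h
  simpa [List.filter_map, Function.comp_def] using h

theorem pvGroups_keys (index : Int) (remainder : List String) :
    (remainder.foldl (fun g card => g.modify (pvKey index card) [] (fun v => v ++ [card])) PySem.Dict.empty).keys
      = PySem.Set.ofList (remainder.map (pvKey index)) := by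
  rw [PySem.Dict.keys_foldl_modify_key remainder (pvKey index) [] (fun _ card => fun v => v ++ [card])]
  simp [PySem.Set.update_nil_left]

-- the two loops agree: A's final aces equal B's free aces, A's phase list equals B's result
theorem pvLoop (length index : Int) (hlen : 0 ≤ length) (t : PySem.Dict Char Int)
    (R0 : List String) :
    ∀ (ks : List Char), ks.Nodup →
    (∀ k ∈ ks, t.getD k 0 = ((R0.filter (fun c => pvKey index c == k)).length : Int)) →
    ∀ (rem free : List String) (phase : List (List String)),
    (∀ k ∈ ks, rem.filter (fun c => pvKey index c == k) = R0.filter (fun c => pvKey index c == k)) →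
    (((∀ c ∈ R0, PySem.Str.pyGet? c 0 ≠ some 'A') ∧ (∀ a ∈ free, PySem.Str.pyGet? a 0 = some 'A'))
     ∨ (∀ k ∈ ks, ¬(2 ≤ (R0.filter (fun c => pvKey index c == k)).length
         ∧ (((R0.filter (fun c => pvKey index c == k)).length : Int)) < length
         ∧ length ≤ (((R0.filter (fun c => pvKey index c == k)).length : Int)) + (free.length : Int)))) →
    ((ks.foldl (pvStepA length index t) (free, rem, phase)).1
        = ((ks.map (fun k => R0.filter (fun c => pvKey index c == k))).foldl (pvStepB length) (phase, free)).2
     ∧ (ks.foldl (pvStepA length index t) (free, rem, phase)).2.2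
        = ((ks.map (fun k => R0.filter (fun c => pvKey index c == k))).foldl (pvStepB length) (phase, free)).1) := by
  intro ks
  induction ks with
  | nil => intro _ _ rem free phase _ _; exact ⟨rfl, rfl⟩
  | cons k ks ih =>
    intro hnd ht rem free phase hinv hcase
    have hndt : ks.Nodup := (List.nodup_cons.mp hnd).2
    have hknot : k ∉ ks := (List.nodup_cons.mp hnd).1
    have htk : t.getD k 0 = ((R0.filter (fun c => pvKey index c == k)).length : Int) :=
      ht k (List.mem_cons_self)
    set m : Char → List String := fun k => R0.filter (fun c => pvKey index c == k) with hm
    have hmem_key : ∀ k' (c : String), c ∈ m k' → pvKey index c = k' := by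
      intro k' c hc
      have := List.of_mem_filter hc
      simpa using this
    have hcollect : rem.foldl (fun acc card => if pvKey index card == k then acc ++ [card] else acc) [] = m k := by
      rw [PySem.List.foldl_append_if_eq_filter]
      simpa using hinv k (List.mem_cons_self)
    simp only [List.foldl_cons, List.map_cons]
    by_cases h1 : t.getD k 0 ≥ length
    · -- branch 1: enough matching cards
      have hstepA : pvStepA length index t (free, rem, phase) k =
          (free, ((m k).take length.toNat).foldl (fun r c => pvRemoveD r c) rem,
           phase ++ [(m k).take length.toNat]) := by
        simp only [pvStepA, if_pos h1, hcollect, pvTrim_eq_take length hlen]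
      have hstepB : pvStepB length (phase, free) (m k) =
          (phase ++ [(m k).take length.toNat], free) := by
        have : ((m k).length : Int) ≥ length := by rw [← htk]; exact h1
        simp only [pvStepB, if_pos this, PySem.List.slice_to _ hlen]
      rw [hstepA, hstepB]
      apply ih hndt (fun k' hk' => ht k' (List.mem_cons_of_mem _ hk'))
      · intro k' hk'
        rw [filter_foldl_pvRemoveD]
        · exact hinv k' (List.mem_cons_of_mem _ hk')
        · intro c hc
          have hck : pvKey index c = k := hmem_key k c (List.mem_of_mem_take hc)
          have : k' ≠ k := fun he => hknot (he ▸ hk')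
          simp [hck, this.symm]
      · rcases hcase with hc | hnp
        · exact Or.inl hc
        · exact Or.inr (fun k' hk' => hnp k' (List.mem_cons_of_mem _ hk'))
    · by_cases h2 : t.getD k 0 ≥ 2 ∧ t.getD k 0 < length
      · by_cases h3 : (free.length : Int) ≥ length - t.getD k 0
        · -- branch 2: pad with aces (impossible in the no-padding-group case)
          have hleft : (∀ c ∈ R0, PySem.Str.pyGet? c 0 ≠ some 'A') ∧
              (∀ a ∈ free, PySem.Str.pyGet? a 0 = some 'A') := by
            rcases hcase with hc | hnp
            · exact hc
            · exfalso
              refine hnp k (List.mem_cons_self) ⟨?_, ?_, ?_⟩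
              · have := h2.1; rw [htk] at this; exact_mod_cast this
              · rw [← htk]; exact h2.2
              · rw [← htk]; omega
          obtain ⟨hR0, hfree⟩ := hleft
          have hmlen : ((m k).length : Int) < length := by rw [← htk]; exact h2.2
          have hneed : length.toNat - (m k).length = (length - ((m k).length : Int)).toNat := by omega
          set need : Nat := (length - ((m k).length : Int)).toNat with hneedd
          have hs : pvTrim length ((m k) ++ free) = m k ++ free.take need := by
            rw [pvTrim_eq_take length hlen, List.take_append, List.take_of_length_le (by omega), hneed]
          have hsplit : ∀ (p : List String × List String),
              ((m k) ++ free.take need).foldl (fun (p : List String × List String) c =>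
                if (PySem.Str.pyGet? c 0).getD ' ' ≠ 'A' then (pvRemoveD p.1 c, p.2)
                else (p.1, pvRemoveD p.2 c)) (rem, free)
              = ((m k).foldl (fun r c => pvRemoveD r c) rem, free.drop need) := by
            intro _
            rw [List.foldl_append]
            have e1 : (m k).foldl (fun (p : List String × List String) c =>
                if (PySem.Str.pyGet? c 0).getD ' ' ≠ 'A' then (pvRemoveD p.1 c, p.2)
                else (p.1, pvRemoveD p.2 c)) (rem, free)
                = ((m k).foldl (fun r c => pvRemoveD r c) rem, free) := by
              rw [PySem.List.foldl_congr_mem _ _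
                    (fun (p : List String × List String) c => (pvRemoveD p.1 c, p.2)) _ ?_]
              · rw [PySem.List.foldl_prod_mk (f := fun r c => pvRemoveD r c) (g := fun (a : List String) (_ : String) => a)]
                simp
              · intro acc x hx
                have hxr : x ∈ R0 := List.mem_of_mem_filter hx
                have hne : PySem.Str.pyGet? x 0 ≠ some 'A' := hR0 x hxr
                have hcnd : (PySem.Str.pyGet? x 0).getD ' ' ≠ 'A' := by
                  cases hg : PySem.Str.pyGet? x 0 with
                  | none => simp
                  | some y =>
                    simp only [Option.getD_some]
                    intro he; exact hne (by rw [hg, he])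
                rw [if_pos hcnd]
            rw [e1]
            have e2 : (free.take need).foldl (fun (p : List String × List String) c =>
                if (PySem.Str.pyGet? c 0).getD ' ' ≠ 'A' then (pvRemoveD p.1 c, p.2)
                else (p.1, pvRemoveD p.2 c)) ((m k).foldl (fun r c => pvRemoveD r c) rem, free)
                = ((m k).foldl (fun r c => pvRemoveD r c) rem, (free.take need).foldl (fun a c => pvRemoveD a c) free) := by
              rw [PySem.List.foldl_congr_mem _ _
                    (fun (p : List String × List String) c => (p.1, pvRemoveD p.2 c)) _ ?_]
              · rw [PySem.List.foldl_prod_mk (f := fun (a : List String) (_ : String) => a) (g := fun a c => pvRemoveD a c)]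
                simp
              · intro acc x hx
                have hax : PySem.Str.pyGet? x 0 = some 'A' := hfree x (List.mem_of_mem_take hx)
                have hcnd : ¬ (PySem.Str.pyGet? x 0).getD ' ' ≠ 'A' := by rw [hax]; simp
                rw [if_neg hcnd]
            rw [e2, foldl_pvRemoveD_take]
          have hstepA : pvStepA length index t (free, rem, phase) k =
              (free.drop need, (m k).foldl (fun r c => pvRemoveD r c) rem,
               phase ++ [m k ++ free.take need]) := by
            simp only [pvStepA, if_neg h1, if_pos h2, if_pos h3, hcollect,
              PySem.List.foldl_append_singleton_eq_self, hs, hsplit (rem, free)]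
          have hstepB : pvStepB length (phase, free) (m k) =
              (phase ++ [m k ++ free.take need], free.drop need) := by
            have hc1 : ¬ ((m k).length : Int) ≥ length := by omega
            have hc2 : 2 ≤ (m k).length := by
              have := h2.1; rw [htk] at this; exact_mod_cast this
            have hc3 : (free.length : Int) ≥ length - ((m k).length : Int) := by rw [← htk]; exact h3
            simp only [pvStepB, if_neg hc1, if_pos hc2, if_pos hc3,
              PySem.List.slice_to _ (by omega : (0:Int) ≤ length - ((m k).length : Int)),
              PySem.List.slice_from _ (by omega : (0:Int) ≤ length - ((m k).length : Int))]
            rw [← hneedd]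
          rw [hstepA, hstepB]
          apply ih hndt (fun k' hk' => ht k' (List.mem_cons_of_mem _ hk'))
          · intro k' hk'
            rw [filter_foldl_pvRemoveD]
            · exact hinv k' (List.mem_cons_of_mem _ hk')
            · intro c hc
              have hck : pvKey index c = k := hmem_key k c hc
              have : k' ≠ k := fun he => hknot (he ▸ hk')
              simp [hck, this.symm]
          · exact Or.inl ⟨hR0, fun a ha => hfree a (List.mem_of_mem_drop ha)⟩
        · -- not enough aces: both loops skip
          have hstepA : pvStepA length index t (free, rem, phase) k = (free, rem, phase) := by
            simp only [pvStepA, if_neg h1, if_pos h2, if_neg h3]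
          have hstepB : pvStepB length (phase, free) (m k) = (phase, free) := by
            have hc1 : ¬ ((m k).length : Int) ≥ length := by rw [← htk]; omega
            have hc2 : 2 ≤ (m k).length := by
              have := h2.1; rw [htk] at this; exact_mod_cast this
            have hc3 : ¬ (free.length : Int) ≥ length - ((m k).length : Int) := by rw [← htk]; exact h3
            simp only [pvStepB, if_neg hc1, if_pos hc2, if_neg hc3]
          rw [hstepA, hstepB]
          exact ih hndt (fun k' hk' => ht k' (List.mem_cons_of_mem _ hk')) rem free phase
            (fun k' hk' => hinv k' (List.mem_cons_of_mem _ hk'))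
            (hcase.imp id (fun hnp k' hk' => hnp k' (List.mem_cons_of_mem _ hk')))
      · -- fewer than two matching cards: both loops skip
        have hstepA : pvStepA length index t (free, rem, phase) k = (free, rem, phase) := by
          simp only [pvStepA, if_neg h1, if_neg h2]
        have hstepB : pvStepB length (phase, free) (m k) = (phase, free) := by
          have hc1 : ¬ ((m k).length : Int) ≥ length := by rw [← htk]; omega
          have hc2 : ¬ 2 ≤ (m k).length := by
            intro hge
            exact h2 ⟨by rw [htk]; exact_mod_cast hge, by rw [htk] at h1 ⊢; omega⟩
          simp only [pvStepB, if_neg hc1, if_neg hc2]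
        rw [hstepA, hstepB]
        exact ih hndt (fun k' hk' => ht k' (List.mem_cons_of_mem _ hk')) rem free phase
          (fun k' hk' => hinv k' (List.mem_cons_of_mem _ hk'))
            (hcase.imp id (fun hnp k' hk' => hnp k' (List.mem_cons_of_mem _ hk')))

-- ===== VERDICT (by name: the statement is the Claim_ definition above) =====
theorem possible_sameitems_spec : Claim_equal_possible_sameitems := by
  intro length index aces remainder _ hpre
  obtain ⟨hlen0, hidx, hthird⟩ := hpre
  unfold Spec_possible_sameitems
  by_cases hre : remainder = []
  · subst hre; rfl
  · have hlen : 0 ≤ length := hlen0.resolve_right hre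
    have hsome : ∀ c ∈ remainder, ∃ x, PySem.Str.pyGet? c index = some x := by
      intro c hc
      have h1 := hidx c hc
      rcases hx : PySem.Str.pyGet? c index with _ | x
      · exfalso
        have h2 : PySem.List.pyGet? c.toList index = none := by simpa using hx
        rw [PySem.List.pyGet?_eq_none_iff] at h2
        exact h2 h1
      · exact ⟨x, rfl⟩
    simp only [possible_sameitems, possible_sameitems_alt]
    rw [pvTally_eq]
    have hkeys : (PySem.Dict.counter (remainder.map (pvKey index))).keys
        = PySem.Set.ofList (remainder.map (pvKey index)) := PySem.Dict.keys_counter _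
    have hnd : (PySem.Dict.counter (remainder.map (pvKey index))).keys.Nodup := by
      rw [hkeys]; exact PySem.Set.nodup_ofList _
    have hgnd : (remainder.foldl (fun g card => g.modify (pvKey index card) [] (fun v => v ++ [card])) PySem.Dict.empty).keys.Nodup := by
      rw [pvGroups_keys]; exact PySem.Set.nodup_ofList _
    have hvalues : (remainder.foldl (fun g card => g.modify (pvKey index card) [] (fun v => v ++ [card])) PySem.Dict.empty).values
        = ((PySem.Dict.counter (remainder.map (pvKey index))).keys).map
            (fun k => remainder.filter (fun c => pvKey index c == k)) := by
      rw [PySem.Dict.values_eq_map_keys _ hgnd [], pvGroups_keys, hkeys]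
      exact List.map_congr_left (fun k _ => pvGroups_getD index remainder k)
    have hcase : ((∀ c ∈ remainder, PySem.Str.pyGet? c 0 ≠ some 'A') ∧
          (∀ a ∈ aces, PySem.Str.pyGet? a 0 = some 'A'))
        ∨ (∀ k ∈ (PySem.Dict.counter (remainder.map (pvKey index))).keys,
            ¬(2 ≤ (remainder.filter (fun c => pvKey index c == k)).length
              ∧ (((remainder.filter (fun c => pvKey index c == k)).length : Int)) < length
              ∧ length ≤ (((remainder.filter (fun c => pvKey index c == k)).length : Int)) + (aces.length : Int))) := by
      rcases hthird with ⟨ha, hr⟩ | hnp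
      · exact Or.inl ⟨hr, ha⟩
      · refine Or.inr ?_
        intro k hk
        rw [hkeys] at hk
        obtain ⟨c0, hc0, hkc⟩ := List.mem_map.mp ((PySem.Set.mem_ofList _ _).mp hk)
        have hfe : remainder.filter (fun c => pvKey index c == k)
            = remainder.filter (fun d => PySem.Str.pyGet? d index == PySem.Str.pyGet? c0 index) := by
          apply List.filter_congr
          intro d hd
          obtain ⟨x, hx⟩ := hsome d hd
          obtain ⟨y, hy⟩ := hsome c0 hc0
          subst hkc
          have hx' : PySem.List.pyGet? d.toList index = some x := by simpa using hx
          have hy' : PySem.List.pyGet? c0.toList index = some y := by simpa using hy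
          simp [pvKey, hx', hy']
        rw [hfe]
        exact hnp c0 hc0
    have hmain := pvLoop length index hlen (PySem.Dict.counter (remainder.map (pvKey index)))
        remainder
        (PySem.Dict.counter (remainder.map (pvKey index))).keys hnd
        (fun k _ => pvCount_eq index remainder k)
        remainder aces []
        (fun k _ => rfl)
        (hcase.imp (fun h => h) (fun h => h))
    rw [hvalues, ← hmain.2]
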